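-- pv_equiv track=rewrite | github.com/Oliwier-Gebczynski/Learn_Python | School/Kartkowka_liczby/app.py | zadanie3
-- ===== SOURCE A (Python) =====
-- def zadanie3(list):
--     policzone = []
--     wynik = []
--     for item in list:
--         item = int(item)
--         binItem = bin(item)
--         strItem = str(binItem)
--         wyciete = strItem[2:]
--
--
--         tablica = []
--         iloscJedynek = 0
--         for letter in wyciete:
--             if letter == "1":
--                 iloscJedynek += 1
--
--         tablica.append(iloscJedynek)
--         tablica.append(wyciete)
--
--         policzone.append(tablica)
--
--     j = 0
--     for item in policzone:
--         i = item[0]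
--
--         if i > j:
--             j = i
--
--     for item in policzone:
--         if item[0] == j:
--             wynik.append(item[1])
--
--     return j, wynik
-- ===== SOURCE B (Python) =====
-- def zadanie3(list):
--     j = 0
--     wynik = []
--     for x in list:
--         b = bin(int(x))[2:]
--         c = b.count("1")
--         if c > j:
--             j = c
--             wynik = [b]
--         elif c == j:
--             wynik.append(b)
--     return j, wynik
-- ===== Notes on version B (the rewrite author's own statement) =====
-- stated objective: faster
-- what changed: Replaces A's three passes (build an intermediate [count, binary-string] table, scan it for the max count, scan it again to collect) with a single streaming pass that keeps the current best count and its list of binary strings, resetting on a larger count and appending on an equal one; the per-item '1'-count uses str.count instead of a per-character loop.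
import Mathlib
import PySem

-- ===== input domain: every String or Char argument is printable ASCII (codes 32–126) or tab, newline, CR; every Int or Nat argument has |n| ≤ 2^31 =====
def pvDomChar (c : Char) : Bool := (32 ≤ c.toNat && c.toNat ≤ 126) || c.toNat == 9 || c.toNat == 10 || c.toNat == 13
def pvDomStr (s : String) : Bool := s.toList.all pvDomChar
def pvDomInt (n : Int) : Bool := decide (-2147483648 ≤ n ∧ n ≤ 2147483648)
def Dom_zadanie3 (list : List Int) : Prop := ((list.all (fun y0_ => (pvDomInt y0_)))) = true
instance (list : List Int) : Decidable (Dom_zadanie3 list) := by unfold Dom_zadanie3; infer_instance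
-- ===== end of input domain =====

-- B replaces A's three passes (build a [count, binary-string] table, scan it for the max, scan it
-- again to collect) by one streaming pass that keeps the best count and its strings as it goes.

-- ===== PORT A =====
-- literal transliteration of Source A: per item bin(int(item))[2:], count '1' by a loop,
-- append [count, string] to policzone; then one pass for the max j, one pass to collect.
def zadanie3 (list : List Int) : Int × List String :=
  let policzone : List (Int × List Char) := list.foldl (fun acc item =>
    let wyciete := PySem.List.slice (PySem.Int.toBinChars0b item) (some 2) none
    let iloscJedynek : Int := wyciete.foldl (fun n letter => if letter == '1' then n + 1 else n) 0
    acc ++ [(iloscJedynek, wyciete)]) []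
  let j := policzone.foldl (fun j item => if item.1 > j then item.1 else j) 0
  let wynik := policzone.foldl (fun wynik item =>
    if item.1 == j then wynik ++ [String.mk item.2] else wynik) []
  (j, wynik)

-- ===== PORT B =====
-- literal transliteration of Source B: one pass carrying (j, wynik); reset on a larger count,
-- append on an equal one.
def zadanie3_alt (list : List Int) : Int × List String :=
  list.foldl (fun jw x =>
    let b := PySem.List.slice (PySem.Int.toBinChars0b x) (some 2) none
    let c : Int := (PySem.Chars.count b ['1'] : Int)
    if c > jw.1 then (c, [String.mk b])
    else if c == jw.1 then (jw.1, jw.2 ++ [String.mk b])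
    else jw) ((0 : Int), ([] : List String))

-- ===== PRECONDITION & SPEC =====
def Spec_zadanie3 (list : List Int) (out : Int × List String) : Prop := out = zadanie3_alt list
instance (list : List Int) (out : Int × List String) : Decidable (Spec_zadanie3 list out) := by unfold Spec_zadanie3; infer_instance

-- ===== CLAIM (what is proved, stated in full; the proofs are below) =====
def Claim_equal_zadanie3 : Prop := ∀ (list : List Int), Dom_zadanie3 list → Spec_zadanie3 list (zadanie3 list)

-- ===== LEMMAS AND PROOFS =====

-- the binary string (as chars) and its '1'-count, shared vocabulary of the proofs
def pvChs (x : Int) : List Char := PySem.List.slice (PySem.Int.toBinChars0b x) (some 2) none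
def pvK (x : Int) : Int := ((pvChs x).count '1' : Int)
def pvM (l : List Int) : Int := (l.map pvK).foldl max 0
def pvW (l : List Int) : List String :=
  (l.filter (fun x => pvK x == pvM l)).map (fun x => String.mk (pvChs x))

lemma count_go_one (c : Char) : ∀ (fuel : Nat) (l : List Char) (acc : Nat), l.length ≤ fuel →
    PySem.Chars.count.go [c] fuel l acc = acc + l.count c := by
  intro fuel
  induction fuel with
  | zero =>
    intro l acc h
    have : l = [] := List.eq_nil_of_length_eq_zero (Nat.le_zero.mp h)
    subst this; simp [PySem.Chars.count.go]
  | succ n ih =>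
    intro l acc h
    cases l with
    | nil => simp [PySem.Chars.count.go]
    | cons hd t =>
      have hlen : t.length ≤ n := by simpa using Nat.lt_succ_iff.mp (by simpa using h)
      by_cases hc : c = hd
      · subst hc
        simp only [PySem.Chars.count.go, List.isPrefixOf, BEq.rfl, Bool.true_and,
          if_true, List.length_singleton, List.drop_one, List.tail_cons]
        rw [ih t (acc+1) hlen]
        simp
        omega
      · simp only [PySem.Chars.count.go, List.isPrefixOf, Bool.and_true]
        rw [if_neg (by simp [hc]), ih t acc hlen]
        simp [Ne.symm hc]

-- b.count("1") for a one-character pattern is the element count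
lemma chars_count_one (l : List Char) (c : Char) :
    PySem.Chars.count l [c] = l.count c := by
  simp [PySem.Chars.count]
  simpa using count_go_one c l.length l 0 le_rfl

-- A returns the max '1'-count (floored at 0) and the strings achieving it, in input order
lemma zadanie3_char (l : List Int) : zadanie3 l = (pvM l, pvW l) := by
  unfold zadanie3
  have h1 : (fun (acc : List (Int × List Char)) (item : Int) =>
      acc ++ [((PySem.List.slice (PySem.Int.toBinChars0b item) (some 2) none).foldl
        (fun n letter => if letter == '1' then n + 1 else n) 0,
        PySem.List.slice (PySem.Int.toBinChars0b item) (some 2) none)])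
      = (fun acc item => acc ++ [(pvK item, pvChs item)]) := by
    funext acc item
    rw [PySem.List.foldl_beq_add_one]
    simp [pvK, pvChs]
  rw [h1, PySem.List.foldl_append_singleton_eq_map, List.nil_append]
  dsimp only
  have h2 : (l.map (fun x => (pvK x, pvChs x))).foldl
      (fun j item => if item.1 > j then item.1 else j) 0 = pvM l := by
    rw [List.foldl_map]
    have : (fun (j : Int) (x : Int) => if (pvK x, pvChs x).1 > j then (pvK x, pvChs x).1 else j)
        = fun j x => max j (pvK x) := by
      funext j x; simp only [max_def]; split_ifs <;> omega
    rw [this, pvM, List.foldl_map]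
  rw [h2]
  simp only [PySem.List.foldl_append_if, List.nil_append, List.filter_map, List.map_map]
  simp [pvW, Function.comp_def]

-- one step of B's fold from the characterised state
lemma pvM_append (l : List Int) (x : Int) : pvM (l ++ [x]) = max (pvM l) (pvK x) := by
  simp [pvM, List.foldl_map]

lemma pvK_le_pvM {l : List Int} {y : Int} (hy : y ∈ l) : pvK y ≤ pvM l := by
  exact (PySem.List.le_foldl_max (l.map pvK) 0).2 _ (List.mem_map_of_mem hy)

-- B maintains (pvM, pvW) of the processed prefix
lemma zadanie3_alt_char (l : List Int) : zadanie3_alt l = (pvM l, pvW l) := by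
  unfold zadanie3_alt
  induction l using List.reverseRecOn with
  | nil => simp [pvM, pvW]
  | append_singleton t x ih =>
    rw [List.foldl_append, ih, List.foldl_cons, List.foldl_nil]
    dsimp only
    rw [chars_count_one]
    show (if pvK x > pvM t then (pvK x, [String.mk (pvChs x)])
      else if (pvK x == pvM t) = true then (pvM t, pvW t ++ [String.mk (pvChs x)])
      else (pvM t, pvW t)) = (pvM (t ++ [x]), pvW (t ++ [x]))
    rw [pvM_append]
    by_cases hgt : pvK x > pvM t
    · rw [if_pos hgt]
      have hmax : max (pvM t) (pvK x) = pvK x := max_eq_right (le_of_lt hgt)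
      have hfil : t.filter (fun y => pvK y == pvK x) = [] := by
        rw [List.filter_eq_nil_iff]
        intro y hy
        have := pvK_le_pvM hy
        simp only [beq_iff_eq]
        omega
      simp [pvW, pvM_append, hmax, hfil, List.filter_append]
    · rw [if_neg hgt]
      have hmax : max (pvM t) (pvK x) = pvM t := max_eq_left (by omega)
      by_cases heq : pvK x = pvM t
      · rw [if_pos (by simpa using heq)]
        simp [pvW, pvM_append, heq, List.filter_append]
      · rw [if_neg (by simpa using heq)]
        simp only [pvW, pvM_append, hmax, List.filter_append, List.filter_cons, List.filter_nil]
        rw [if_neg (by simpa using heq)]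
        simp

-- ===== VERDICT (by name: the statement is the Claim_ definition above) =====
theorem zadanie3_spec : Claim_equal_zadanie3 := by
  intro l _
  unfold Spec_zadanie3
  rw [zadanie3_char, zadanie3_alt_char]
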